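-- pv_equiv track=rewrite | github.com/AsranCo/Sample | Quera-Task/148639.py | add_next
-- ===== SOURCE A (Python) =====
-- def add_next(N, bits):
--     if bits == 1:
--         return [""]
--     ret = []
--     c = 2 ** (N - 1)
--     if N == bits:
--         while c < 2 ** N - 1:
--             ret.append("+\\frac{" + str(c) + "}{" + str(c + 1) + "}")
--             c = c + 2
--     else:
--         add = add_next(N + 1, bits)
--         while c < 2 ** N - 1:
--             a = str(add[c - 2 ** (N - 1)])
--             b = str(add[c - 2 ** (N - 1) + 1])
--             ret.append("+\\frac{" + str(c) + a + "}{" + str(c + 1) + b + "}")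
--
--             c = c + 2
--
--     return ret
-- ===== SOURCE B (Python) =====
-- def add_next(N, bits):
--     if bits == 1:
--         return [""]
--
--     def frac(M, i):
--         # i-th entry (0-based) at nesting level M: numerator index c = 2**(M-1) + 2*i
--         c = 2 ** (M - 1) + 2 * i
--         if M == bits:
--             return "+\\frac{" + str(c) + "}{" + str(c + 1) + "}"
--         return ("+\\frac{" + str(c) + frac(M + 1, 2 * i) + "}{"
--                 + str(c + 1) + frac(M + 1, 2 * i + 1) + "}")
--
--     width = 2 ** (N - 2) if N >= 2 else 0
--     return [frac(N, i) for i in range(width)]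
-- ===== Notes on version B (the rewrite author's own statement) =====
-- stated objective: alternative
-- what changed: B builds each output entry directly by a top-down per-entry recursion (entry i at level M composes entries 2i and 2i+1 of level M+1 via a closed-form c = 2**(M-1)+2i), instead of A's level-by-level recursion that materialises the whole next-level list and indexes into it.
import Mathlib
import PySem

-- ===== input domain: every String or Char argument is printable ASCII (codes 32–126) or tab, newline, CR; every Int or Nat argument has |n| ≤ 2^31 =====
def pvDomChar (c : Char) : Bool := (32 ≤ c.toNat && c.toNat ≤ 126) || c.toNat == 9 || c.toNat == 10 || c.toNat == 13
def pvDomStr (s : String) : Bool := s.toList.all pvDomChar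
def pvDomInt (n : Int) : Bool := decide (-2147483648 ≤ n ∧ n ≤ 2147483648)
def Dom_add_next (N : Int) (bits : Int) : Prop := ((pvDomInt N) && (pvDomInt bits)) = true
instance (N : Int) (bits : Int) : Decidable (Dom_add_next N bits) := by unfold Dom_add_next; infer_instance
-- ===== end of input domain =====

-- B replaces A's level-by-level recursion (each entry indexing into the full next-level list)
-- by one per-entry top-down recursion building entry i directly from entries 2i and 2i+1;
-- objective: alternative decomposition, same cost.

-- ===== PORT A =====
-- Both of A's while-loops have the shape "while c < stop: ret.append(body(c)); c += 2";
-- this helper is that loop, called with each loop's body.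
def add_next_loop (body : Int → String) (c stop : Int) : List String :=
  if c < stop then body c :: add_next_loop body (c + 2) stop else []
termination_by (stop - c).toNat
decreasing_by omega

-- Port of A. Python's 2 ** (N - 1) is rendered as 2 ^ (N-1).toNat — exact for N ≥ 1
-- (inside Pre_); for N ≤ 0 Python computes a float. str(add[...]) is str of a string,
-- i.e. the element itself; the out-of-range IndexError case (never reached inside Pre_)
-- is totalised with .getD "". A recurses forever when N > bits and bits ≠ 1 (outside
-- Pre_); that branch returns [] as a totality guard.
def add_next (N : Int) (bits : Int) : List String :=
  if bits = 1 then [""]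
  else if N = bits then
    add_next_loop
      (fun c => "+\\frac{" ++ PySem.Int.toStr c ++ "}{" ++ PySem.Int.toStr (c + 1) ++ "}")
      (2 ^ (N - 1).toNat) (2 ^ N.toNat - 1)
  else if _h : N < bits then
    let add := add_next (N + 1) bits
    add_next_loop
      (fun c =>
        let a := (PySem.List.pyGet? add (c - 2 ^ (N - 1).toNat)).getD ""
        let b := (PySem.List.pyGet? add (c - 2 ^ (N - 1).toNat + 1)).getD ""
        "+\\frac{" ++ PySem.Int.toStr c ++ a ++ "}{" ++ PySem.Int.toStr (c + 1) ++ b ++ "}")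
      (2 ^ (N - 1).toNat) (2 ^ N.toNat - 1)
  else []
termination_by (bits - N).toNat
decreasing_by omega

-- ===== PORT B =====
-- frac(M, i) of Source B; the M > bits case (unreachable from add_next_alt inside Pre_)
-- returns "" as a totality guard.
def add_next_alt_frac (bits : Int) (M : Int) (i : Int) : String :=
  let c : Int := 2 ^ (M - 1).toNat + 2 * i
  if M = bits then
    "+\\frac{" ++ PySem.Int.toStr c ++ "}{" ++ PySem.Int.toStr (c + 1) ++ "}"
  else if _h : M < bits then
    "+\\frac{" ++ PySem.Int.toStr c ++ add_next_alt_frac bits (M + 1) (2 * i) ++ "}{"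
      ++ PySem.Int.toStr (c + 1) ++ add_next_alt_frac bits (M + 1) (2 * i + 1) ++ "}"
  else ""
termination_by (bits - M).toNat
decreasing_by all_goals omega

def add_next_alt (N : Int) (bits : Int) : List String :=
  if bits = 1 then [""]
  else
    let width : Nat := if 2 ≤ N then 2 ^ (N - 2).toNat else 0
    (List.range width).map (fun i => add_next_alt_frac bits N (Int.ofNat i))

-- ===== PRECONDITION & SPEC =====
-- Pre_ excludes only N > bits with bits ≠ 1, where A recurses without bound and raises
-- RecursionError. (For N ≤ 0 Python evaluates 2**(N-1) as a float, but every such loop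
-- guard is false, so A returns [] and the ports agree; this stays inside Pre_.)
def Pre_add_next (N : Int) (bits : Int) : Prop := bits = 1 ∨ N ≤ bits
instance (N : Int) (bits : Int) : Decidable (Pre_add_next N bits) := by
  unfold Pre_add_next; infer_instance

def pvWitness_add_next : Int × Int := (2, 3)

def Spec_add_next (N : Int) (bits : Int) (out : List String) : Prop := out = add_next_alt N bits
instance (N : Int) (bits : Int) (out : List String) : Decidable (Spec_add_next N bits out) := by
  unfold Spec_add_next; infer_instance

-- ===== CLAIM (what is proved, stated in full; the proofs are below) =====
def Claim_equal_add_next : Prop :=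
  ∀ (N : Int) (bits : Int), Dom_add_next N bits → Pre_add_next N bits →
    Spec_add_next N bits (add_next N bits)

-- ===== LEMMAS AND PROOFS =====

-- The step-by-2 loop, run from c for exactly k iterations, is a map over List.range k.
lemma loop_eq_map (body : Int → String) (k : Nat) :
    ∀ (c stop : Int), stop ≤ c + 2 * (k : Int) → c + 2 * (k : Int) ≤ stop + 1 →
      add_next_loop body c stop = (List.range k).map (fun i : Nat => body (c + 2 * (i : Int))) := by
  induction k with
  | zero =>
      intro c stop h1 _
      rw [add_next_loop, if_neg (by omega)]
      simp
  | succ k ih =>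
      intro c stop h1 h2
      rw [add_next_loop, if_pos (by push_cast at h2 ⊢; omega)]
      rw [List.range_succ_eq_map, List.map_cons, List.map_map,
        ih (c + 2) stop (by push_cast at h1 ⊢; omega) (by push_cast at h2 ⊢; omega)]
      congr 1
      · norm_num
      · apply List.map_congr_left
        intro i _
        simp only [Function.comp_apply]
        congr 1
        push_cast
        ring

-- A's level-N list equals B's per-entry construction mapped over the level width.
lemma add_next_eq_map (m : Nat) :
    ∀ (N bits : Int), (bits - N).toNat = m → 1 ≤ N → N ≤ bits → bits ≠ 1 →
      add_next N bits =
        (List.range (if 2 ≤ N then 2 ^ (N - 2).toNat else 0)).map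
          (fun i => add_next_alt_frac bits N (Int.ofNat i)) := by
  induction m with
  | zero =>
      intro N bits hm hN hNb hb1
      have hNeq : N = bits := by omega
      have h2N : 2 ≤ N := by omega
      have e1 : (N - 1).toNat = (N - 2).toNat + 1 := by omega
      have e2 : N.toNat = (N - 2).toNat + 2 := by omega
      have key : (2 : Int) ^ (N - 1).toNat + 2 * ((2 ^ (N - 2).toNat : Nat) : Int)
          = 2 ^ N.toNat := by
        rw [e1, e2]; push_cast; ring
      rw [add_next, if_neg hb1, if_pos hNeq, if_pos h2N,
        loop_eq_map _ (2 ^ (N - 2).toNat) _ _ (by linarith [key]) (by linarith [key])]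
      apply List.map_congr_left
      intro i _
      simp [add_next_alt_frac, hNeq, Int.ofNat_eq_natCast]
  | succ m ih =>
      intro N bits hm hN hNb hb1
      have hlt : N < bits := by omega
      have hadd := ih (N + 1) bits (by omega) (by omega) (by omega) hb1
      rw [if_pos (by omega : (2:Int) ≤ N + 1)] at hadd
      have eN : (N + 1 - 2 : Int) = N - 1 := by ring
      rw [eN] at hadd
      rw [add_next, if_neg hb1, if_neg (by omega : ¬ N = bits), dif_pos hlt]
      simp only [hadd]
      by_cases h2N : 2 ≤ N
      · have e1 : (N - 1).toNat = (N - 2).toNat + 1 := by omega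
        have e2 : N.toNat = (N - 2).toNat + 2 := by omega
        have key : (2 : Int) ^ (N - 1).toNat + 2 * ((2 ^ (N - 2).toNat : Nat) : Int)
            = 2 ^ N.toNat := by
          rw [e1, e2]; push_cast; ring
        rw [if_pos h2N,
          loop_eq_map _ (2 ^ (N - 2).toNat) _ _ (by linarith [key]) (by linarith [key])]
        apply List.map_congr_left
        intro i hi
        have hiw : i < 2 ^ (N - 2).toNat := List.mem_range.mp hi
        have hpow : 2 ^ (N - 1).toNat = 2 * 2 ^ (N - 2).toNat := by
          rw [e1, pow_succ]; ring
        have hidx1 : (2 : Int) ^ (N - 1).toNat + 2 * (i : Int) - 2 ^ (N - 1).toNat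
            = ((2 * i : Nat) : Int) := by push_cast; ring
        have hidx2 : ((2 * i : Nat) : Int) + 1 = ((2 * i + 1 : Nat) : Int) := by
          push_cast; ring
        rw [hidx1, hidx2, PySem.List.pyGet?_natCast, PySem.List.pyGet?_natCast,
          List.getElem?_map, List.getElem?_map, List.getElem?_range (by omega),
          List.getElem?_range (by omega)]
        simp only [Option.map_some, Option.getD_some]
        conv_rhs => rw [add_next_alt_frac]
        rw [if_neg (by omega : ¬ N = bits), dif_pos hlt]
        simp only [Int.ofNat_eq_natCast]
        push_cast
        ring_nf
      · have hN1 : N = 1 := by omega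
        subst hN1
        rw [if_neg h2N]
        rw [add_next_loop, if_neg (by norm_num)]
        simp

-- For N ≤ 0 (and bits ≠ 1) every loop guard of A is false, so A returns [].
lemma add_next_nonpos (N bits : Int) (hN : N ≤ 0) (hb : bits ≠ 1) :
    add_next N bits = [] := by
  have h0 : (N - 1).toNat = 0 := by omega
  have h1 : N.toNat = 0 := by omega
  rw [add_next, if_neg hb]
  by_cases he : N = bits
  · rw [if_pos he, h0, h1, add_next_loop]
    norm_num
  · rw [if_neg he]
    by_cases hlt : N < bits
    · rw [dif_pos hlt]
      simp only [h0, h1]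
      rw [add_next_loop]
      norm_num
    · rw [dif_neg hlt]

-- ===== VERDICT (by name: the statement is the Claim_ definition above) =====
theorem add_next_spec : Claim_equal_add_next := by
  intro N bits _dom hpre
  unfold Spec_add_next
  by_cases h1 : bits = 1
  · rw [add_next, add_next_alt]; simp [h1]
  · have hNb : N ≤ bits := by
      rcases hpre with h | h
      · exact absurd h h1
      · exact h
    by_cases hN : 1 ≤ N
    · rw [add_next_eq_map ((bits - N).toNat) N bits rfl hN hNb h1, add_next_alt]
      simp [h1]
    · rw [add_next_nonpos N bits (by omega) h1, add_next_alt]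
      simp [h1, show ¬ (2:Int) ≤ N by omega]
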